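-- pv_equiv track=rewrite | github.com/txje/Unicycler | lib/assembly_graph.py | insert_num_in_list
-- ===== SOURCE A (Python) =====
-- def insert_num_in_list(lst, val_1, val_2, insert_val):
--     '''
--     If the list lst contains val_1 immediately followed by val_2, the function returns a new list
--     with insert_val between them. If the list does not contain that sequence of values, this
--     function just returns the original list.
--     '''
--     if len(lst) < 2:
--         return lst
--     new_list = []
--     for i, val in enumerate(lst[:-1]):
--         next_val = lst[i+1]
--         new_list.append(val)
--         if val == val_1 and next_val == val_2:
--             new_list.append(insert_val)
--     new_list.append(lst[-1])
--     return new_list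
-- ===== SOURCE B (Python) =====
-- def insert_num_in_list(lst, val_1, val_2, insert_val):
--     if len(lst) < 2:
--         return lst
--     # stage 1: index table of insertion points (position just after each matching pair)
--     positions = [i + 1 for i in range(len(lst) - 1)
--                  if lst[i] == val_1 and lst[i + 1] == val_2]
--     # stage 2: reassemble by concatenating slices between insertion points
--     out = []
--     prev = 0
--     for p in positions:
--         out += lst[prev:p]
--         out.append(insert_val)
--         prev = p
--     out += lst[prev:]
--     return out
-- ===== Notes on version B (the rewrite author's own statement) =====
-- stated objective: alternative
-- what changed: Replaces A's single append-each-element pair-scan by a two-stage algorithm: first build an index table of insertion points, then reassemble the output by concatenating the slices of lst between consecutive insertion points with insert_val in between.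
import Mathlib
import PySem

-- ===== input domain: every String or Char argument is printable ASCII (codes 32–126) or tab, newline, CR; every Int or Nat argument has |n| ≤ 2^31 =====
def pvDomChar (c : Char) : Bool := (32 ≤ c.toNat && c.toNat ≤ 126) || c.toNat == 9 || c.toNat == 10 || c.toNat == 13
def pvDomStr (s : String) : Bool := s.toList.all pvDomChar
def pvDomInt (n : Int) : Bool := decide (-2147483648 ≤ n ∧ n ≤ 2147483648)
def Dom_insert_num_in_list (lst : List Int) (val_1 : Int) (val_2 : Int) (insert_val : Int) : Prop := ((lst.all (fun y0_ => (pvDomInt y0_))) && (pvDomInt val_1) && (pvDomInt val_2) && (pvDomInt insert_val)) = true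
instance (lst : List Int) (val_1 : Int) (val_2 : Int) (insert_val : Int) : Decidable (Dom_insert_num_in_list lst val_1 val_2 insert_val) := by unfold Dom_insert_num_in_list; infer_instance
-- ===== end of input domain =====

-- B replaces A's append-each-element pair-scan by an index table of insertion points
-- followed by slice-concatenation reassembly (alternative decomposition; same cost).
-- ===== PORT A =====
-- literal port of A: guard, then for (i, val) in enumerate(lst[:-1]) appending into new_list,
-- then append lst[-1].  lst[i+1] and lst[-1] are always in range here, so .getD 0 never fires.
def insert_num_in_list (lst : List Int) (val_1 : Int) (val_2 : Int) (insert_val : Int) : List Int :=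
  if lst.length < 2 then lst
  else
    let new_list : List Int :=
      (PySem.List.enumerate (PySem.List.slice lst none (some (-1)))).foldl
        (fun acc p =>
          let next_val : Int := (PySem.List.pyGet? lst (p.1 + 1)).getD 0
          let acc := acc ++ [p.2]
          if p.2 = val_1 ∧ next_val = val_2 then acc ++ [insert_val] else acc)
        []
    new_list ++ [(PySem.List.pyGet? lst (-1)).getD 0]

-- ===== PORT B =====
-- literal port of Source B: guard, then the positions comprehension over range(len(lst)-1),
-- then the slice-reassembly loop over positions with state (out, prev), then out += lst[prev:].
-- lst[i] and lst[i+1] are always in range for i in the range, so .getD 0 never fires.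
def insert_num_in_list_alt (lst : List Int) (val_1 : Int) (val_2 : Int) (insert_val : Int) : List Int :=
  if lst.length < 2 then lst
  else
    let positions : List Int :=
      (PySem.List.pyRange 0 ((lst.length : Int) - 1) 1).filterMap
        (fun i =>
          if (PySem.List.pyGet? lst i).getD 0 = val_1 ∧
             (PySem.List.pyGet? lst (i + 1)).getD 0 = val_2
          then some (i + 1) else none)
    let st : List Int × Int :=
      positions.foldl
        (fun (st : List Int × Int) p =>
          (st.1 ++ PySem.List.slice lst (some st.2) (some p) ++ [insert_val], p))
        ([], 0)
    st.1 ++ PySem.List.slice lst (some st.2) none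

-- ===== PRECONDITION & SPEC =====
def Spec_insert_num_in_list (lst : List Int) (val_1 : Int) (val_2 : Int) (insert_val : Int) (out : List Int) : Prop := out = insert_num_in_list_alt lst val_1 val_2 insert_val
instance (lst : List Int) (val_1 : Int) (val_2 : Int) (insert_val : Int) (out : List Int) : Decidable (Spec_insert_num_in_list lst val_1 val_2 insert_val out) := by unfold Spec_insert_num_in_list; infer_instance

-- ===== CLAIM (what is proved, stated in full; the proofs are below) =====
def Claim_equal_insert_num_in_list : Prop := ∀ (lst : List Int) (val_1 : Int) (val_2 : Int) (insert_val : Int), Dom_insert_num_in_list lst val_1 val_2 insert_val → Spec_insert_num_in_list lst val_1 val_2 insert_val (insert_num_in_list lst val_1 val_2 insert_val)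

-- ===== LEMMAS AND PROOFS =====

-- the per-position chunk both ports produce: [lst[i], insert_val] on a match, [lst[i]] otherwise
def pvChunk (lst : List Int) (val_1 val_2 insert_val : Int) (i : Nat) : List Int :=
  if (PySem.List.pyGet? lst (i : Int)).getD 0 = val_1 ∧
     (PySem.List.pyGet? lst ((i : Int) + 1)).getD 0 = val_2
  then [(PySem.List.pyGet? lst (i : Int)).getD 0, insert_val]
  else [(PySem.List.pyGet? lst (i : Int)).getD 0]

theorem pv_take_succ_chunk (lst : List Int) (prev q : Nat)
    (hpq : prev ≤ q) (hq : q < lst.length) :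
    (lst.drop prev).take (q + 1 - prev)
      = (lst.drop prev).take (q - prev) ++ [(PySem.List.pyGet? lst (q : Int)).getD 0] := by
  have h1 : q + 1 - prev = (q - prev) + 1 := by omega
  rw [h1, List.take_add_one]
  have h2 : (lst.drop prev)[q - prev]? = some lst[q] := by
    rw [List.getElem?_drop]
    have : prev + (q - prev) = q := by omega
    rw [this, List.getElem?_eq_getElem hq]
  rw [h2]
  have h3 : PySem.List.pyGet? lst (q : Int) = some lst[q] := by
    rw [PySem.List.pyGet?_natCast, List.getElem?_eq_getElem hq]
  rw [h3]
  rfl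

theorem pv_drop_last (lst : List Int) (m : Nat) (hm : lst.length = m + 1) :
    lst.drop m = [(PySem.List.pyGet? lst (-1)).getD 0] := by
  have hmlt : m < lst.length := by omega
  have h1 : lst.drop m = lst[m] :: lst.drop (m + 1) := List.drop_eq_getElem_cons hmlt
  have h2 : lst.drop (m + 1) = [] := by rw [← hm]; exact List.drop_length
  have h3 : PySem.List.pyGet? lst (-1) = some lst[m] := by
    rw [PySem.List.pyGet?_neg_one, List.getLast?_eq_getElem?]
    have : lst.length - 1 = m := by omega
    rw [this, List.getElem?_eq_getElem hmlt]
  rw [h1, h2, h3]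
  rfl

theorem insert_A_flat (lst : List Int) (val_1 val_2 insert_val : Int)
    (h2 : 2 ≤ lst.length) :
    insert_num_in_list lst val_1 val_2 insert_val
      = ((List.range (lst.length - 1)).map (pvChunk lst val_1 val_2 insert_val)).flatten
        ++ [(PySem.List.pyGet? lst (-1)).getD 0] := by
  unfold insert_num_in_list
  rw [if_neg (by omega)]
  rw [PySem.List.slice_to_neg_one]
  have hbody :
      (fun (acc : List Int) (p : Int × Int) =>
        let next_val : Int := (PySem.List.pyGet? lst (p.1 + 1)).getD 0
        let acc := acc ++ [p.2]
        if p.2 = val_1 ∧ next_val = val_2 then acc ++ [insert_val] else acc)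
      = (fun (acc : List Int) (p : Int × Int) =>
          acc ++ (if p.2 = val_1 ∧ (PySem.List.pyGet? lst (p.1 + 1)).getD 0 = val_2
                  then [p.2, insert_val] else [p.2])) := by
    funext acc p
    dsimp only
    split <;> simp
  rw [hbody, PySem.List.foldl_append_eq_flatMap, List.flatMap_def]
  simp only [List.nil_append]
  congr 1
  congr 1
  apply List.ext_getElem
  · simp [PySem.List.length_enumerate]
  · intro i h1 h2'
    have hi : i < lst.length - 1 := by
      simpa [PySem.List.length_enumerate, List.length_dropLast] using h1
    have hi1 : i + 1 < lst.length := by omega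
    simp only [List.getElem_map, PySem.List.getElem_enumerate, List.getElem_range,
      List.getElem_dropLast]
    unfold pvChunk
    have hgq : (PySem.List.pyGet? lst ((i:Nat) : Int)).getD 0 = lst[i] := by
      rw [PySem.List.pyGet?_natCast, List.getElem?_eq_getElem (by omega : i < lst.length)]
      rfl
    rw [hgq]
    rw [zero_add]

theorem insert_B_fold (lst : List Int) (val_1 val_2 insert_val : Int)
    (m : Nat) (hm : lst.length = m + 1) :
    ∀ (k q prev : Nat) (out : List Int), q + k = m → prev ≤ q →
    (fun st : List Int × Int => st.1 ++ PySem.List.slice lst (some st.2) none)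
      (((PySem.List.pyRange (q : Int) (m : Int) 1).filterMap
          (fun i =>
            if (PySem.List.pyGet? lst i).getD 0 = val_1 ∧
               (PySem.List.pyGet? lst (i + 1)).getD 0 = val_2
            then some (i + 1) else none)).foldl
         (fun (st : List Int × Int) p =>
           (st.1 ++ PySem.List.slice lst (some st.2) (some p) ++ [insert_val], p))
         (out, (prev : Int)))
    = out ++ (lst.drop prev).take (q - prev)
      ++ ((List.range' q k).map (pvChunk lst val_1 val_2 insert_val)).flatten
      ++ [(PySem.List.pyGet? lst (-1)).getD 0] := by
  intro k
  induction k with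
  | zero =>
    intro q prev out hqk hpq
    have hq : q = m := by omega
    subst hq
    rw [PySem.List.pyRange_one_eq_nil (le_refl _)]
    simp only [List.filterMap_nil, List.foldl_nil]
    rw [PySem.List.slice_from_natCast]
    have hsplit : lst.drop prev
        = (lst.drop prev).take (q - prev) ++ [(PySem.List.pyGet? lst (-1)).getD 0] := by
      conv_lhs => rw [← List.take_append_drop (q - prev) (lst.drop prev)]
      congr 1
      rw [List.drop_drop]
      have h4 : prev + (q - prev) = q := by omega
      rw [h4]
      exact pv_drop_last lst q hm
    conv_lhs => rw [hsplit]
    simp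
  | succ k ih =>
    intro q prev out hqk hpq
    have hqm : (q : Int) < (m : Int) := by exact_mod_cast (by omega : q < m)
    rw [PySem.List.pyRange_one_cons hqm, List.filterMap_cons]
    have hc1 : ((q : Int)) + 1 = ((q + 1 : Nat) : Int) := by push_cast; ring
    have hql : q < lst.length := by omega
    by_cases hmatch : (PySem.List.pyGet? lst ((q : Int))).getD 0 = val_1 ∧
        (PySem.List.pyGet? lst ((q : Int) + 1)).getD 0 = val_2
    · rw [if_pos hmatch, List.foldl_cons]
      rw [hc1]
      rw [PySem.List.slice_natCast]
      rw [ih (q + 1) (q + 1) (out ++ (lst.drop prev).take (q + 1 - prev) ++ [insert_val])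
           (by omega) (le_refl _)]
      rw [pv_take_succ_chunk lst prev q hpq hql]
      rw [List.range'_succ, List.map_cons, List.flatten_cons]
      have hchunk : pvChunk lst val_1 val_2 insert_val q
          = [(PySem.List.pyGet? lst (q : Int)).getD 0, insert_val] := by
        unfold pvChunk
        rw [if_pos hmatch]
      rw [hchunk]
      simp
    · rw [if_neg hmatch]
      rw [hc1]
      rw [ih (q + 1) prev out (by omega) (by omega)]
      rw [pv_take_succ_chunk lst prev q hpq hql]
      rw [List.range'_succ, List.map_cons, List.flatten_cons]
      have hchunk : pvChunk lst val_1 val_2 insert_val q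
          = [(PySem.List.pyGet? lst (q : Int)).getD 0] := by
        unfold pvChunk
        rw [if_neg hmatch]
      rw [hchunk]
      simp

theorem insert_num_in_list_eq_alt (lst : List Int) (val_1 val_2 insert_val : Int) :
    insert_num_in_list lst val_1 val_2 insert_val
      = insert_num_in_list_alt lst val_1 val_2 insert_val := by
  by_cases h2 : lst.length < 2
  · unfold insert_num_in_list insert_num_in_list_alt
    rw [if_pos h2, if_pos h2]
  · have h2' : 2 ≤ lst.length := by omega
    unfold insert_num_in_list_alt
    rw [if_neg h2]
    rw [insert_A_flat lst val_1 val_2 insert_val h2']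
    have hB := insert_B_fold lst val_1 val_2 insert_val (lst.length - 1) (by omega)
      (lst.length - 1) 0 0 [] (by omega) (le_refl 0)
    simp only [Nat.cast_zero, List.drop_zero, List.take_zero,
      List.nil_append, Nat.sub_self] at hB
    rw [← List.range_eq_range'] at hB
    have hcast : ((lst.length : Int) - 1) = ((lst.length - 1 : Nat) : Int) := by omega
    rw [hcast]
    exact hB.symm

-- ===== VERDICT (by name: the statement is the Claim_ definition above) =====
theorem insert_num_in_list_spec : Claim_equal_insert_num_in_list := by
  intro lst val_1 val_2 insert_val _
  unfold Spec_insert_num_in_list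
  exact insert_num_in_list_eq_alt lst val_1 val_2 insert_val
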